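-- pv_equiv track=rewrite | github.com/deshaw/pjrmi | java/src/main/java/com/deshaw/hypercube/primitive_nd_wrapping_hypercube.py | _get_dimensions
-- ===== SOURCE A (Python) =====
-- def _get_dimensions(ndims, kwargs):
--     head = '''\
--         final long[] shape = new long[{ndims}];
-- '''.format(ndims=ndims)
--     tail = '''\
--         return Dimension.of(shape);'''
--
--     prev_array = 'array'
--     for dim in range(ndims):
--         indent = '    ' * dim
--         subarray = 'array%d' % (dim+1)
--
--         head += '''\
--         {indent}shape[{dim}] = Math.max(shape[{dim}], {prev_array}.length);
-- '''.format(dim       =dim,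
--            prev_array=prev_array,
--            indent    =indent)
--
--         if dim < (ndims-1):
--             head += '''\
--         {indent}for ({primitive_type}{array_defn} {subarrary} : {prev_array}) {{
-- '''.format(primitive_type=kwargs['primitive_type'],
--            array_defn    ='[]' * (ndims - dim - 1),
--            subarrary     =subarray,
--            prev_array    =prev_array,
--            indent        =indent)
--
--             tail = '''\
--         {indent}}}
-- '''.format(indent=indent) + tail
--
--         prev_array = subarray
--
--     return head + tail
-- ===== SOURCE B (Python) =====
-- def _get_dimensions(ndims, kwargs):
--     # Recursive decomposition: build each dimension's block (shape line, for-loop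
--     # opener, nested inner block, matching closing brace) in one place, instead of
--     # A's flat loop that appends to head while prepending closers to tail.
--     def block(dim, prev_array):
--         indent = '    ' * dim
--         out = '        %sshape[%d] = Math.max(shape[%d], %s.length);\n' % (
--             indent, dim, dim, prev_array)
--         if dim < ndims - 1:
--             subarray = 'array%d' % (dim + 1)
--             out += '        %sfor (%s%s %s : %s) {\n' % (
--                 indent, kwargs['primitive_type'], '[]' * (ndims - dim - 1),
--                 subarray, prev_array)
--             out += block(dim + 1, subarray)
--             out += '        %s}\n' % indent
--         return out
--
--     body = block(0, 'array') if ndims > 0 else ''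
--     return ('        final long[] shape = new long[%d];\n' % ndims
--             + body
--             + '        return Dimension.of(shape);')
-- ===== Notes on version B (the rewrite author's own statement) =====
-- stated objective: alternative
-- what changed: A builds the code in one flat forward loop that appends to head while prepending closing braces to tail; B builds the nested block by structural recursion on the dimension, emitting each dimension's shape line, for-opener, inner block and matching closing brace in one place.
import Mathlib
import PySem

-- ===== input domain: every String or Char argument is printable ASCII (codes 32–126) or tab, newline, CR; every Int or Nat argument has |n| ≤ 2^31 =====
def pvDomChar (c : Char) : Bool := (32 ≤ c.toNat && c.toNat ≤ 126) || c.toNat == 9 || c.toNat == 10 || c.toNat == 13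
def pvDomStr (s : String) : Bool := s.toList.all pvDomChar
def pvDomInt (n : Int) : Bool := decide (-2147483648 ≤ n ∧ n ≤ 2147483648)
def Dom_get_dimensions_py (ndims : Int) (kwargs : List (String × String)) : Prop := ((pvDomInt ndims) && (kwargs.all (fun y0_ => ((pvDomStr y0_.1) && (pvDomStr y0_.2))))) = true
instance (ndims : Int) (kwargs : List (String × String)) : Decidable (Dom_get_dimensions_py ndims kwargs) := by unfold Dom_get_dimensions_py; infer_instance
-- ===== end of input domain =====

-- B replaces A's flat loop (append to head / prepend closers to tail) by a recursive
-- helper that builds each dimension's whole block — shape line, for-opener, inner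
-- block, matching closing brace — in one place (objective: alternative decomposition).

-- ===== PORT A =====
-- A's loop body, one iteration (dim), acting on the state (head, tail, prev_array).
-- kwargs['primitive_type'] → Dict getD with default "" (the KeyError case, ndims ≥ 2
-- with the key absent, is excluded by Pre_).
def gdStep (ndims : Int) (kwargs : List (String × String))
    (st : List Char × List Char × List Char) (dim : Int) :
    List Char × List Char × List Char :=
  let head := st.1
  let tail := st.2.1
  let prev_array := st.2.2
  let indent := PySem.List.pyRepeat "    ".toList dim
  let subarray := "array".toList ++ PySem.Int.toChars (dim + 1)
  let head := head ++ "        ".toList ++ indent ++ "shape[".toList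
    ++ PySem.Int.toChars dim ++ "] = Math.max(shape[".toList ++ PySem.Int.toChars dim
    ++ "], ".toList ++ prev_array ++ ".length);\n".toList
  if dim < ndims - 1 then
    let head := head ++ "        ".toList ++ indent ++ "for (".toList
      ++ ((PySem.Dict.mk kwargs).getD "primitive_type" "").toList
      ++ PySem.List.pyRepeat "[]".toList (ndims - dim - 1) ++ " ".toList
      ++ subarray ++ " : ".toList ++ prev_array ++ ") {\n".toList
    let tail := "        ".toList ++ indent ++ "}\n".toList ++ tail
    (head, tail, subarray)
  else
    (head, tail, subarray)

def get_dimensions_py (ndims : Int) (kwargs : List (String × String)) : String :=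
  let head := "        final long[] shape = new long[".toList ++ PySem.Int.toChars ndims
                ++ "];\n".toList
  let tail := "        return Dimension.of(shape);".toList
  let r := (PySem.List.pyRange 0 ndims 1).foldl (gdStep ndims kwargs)
    (head, tail, "array".toList)
  String.ofList (r.1 ++ r.2.1)

-- ===== PORT B =====
-- Recursive helper = Source B's `block(dim, prev_array)` (pt = kwargs['primitive_type']).
def gdBlock (ndims : Int) (pt : List Char) (dim : Int) (prev_array : List Char) : List Char :=
  let indent := PySem.List.pyRepeat "    ".toList dim
  let out := "        ".toList ++ indent ++ "shape[".toList ++ PySem.Int.toChars dim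
    ++ "] = Math.max(shape[".toList ++ PySem.Int.toChars dim ++ "], ".toList
    ++ prev_array ++ ".length);\n".toList
  if _h : dim < ndims - 1 then
    let subarray := "array".toList ++ PySem.Int.toChars (dim + 1)
    out ++ "        ".toList ++ indent ++ "for (".toList ++ pt
      ++ PySem.List.pyRepeat "[]".toList (ndims - dim - 1) ++ " ".toList
      ++ subarray ++ " : ".toList ++ prev_array ++ ") {\n".toList
      ++ gdBlock ndims pt (dim + 1) subarray
      ++ "        ".toList ++ indent ++ "}\n".toList
  else
    out
termination_by (ndims - dim).toNat
decreasing_by omega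

def get_dimensions_py_alt (ndims : Int) (kwargs : List (String × String)) : String :=
  let body := if ndims > 0 then
      gdBlock ndims ((PySem.Dict.mk kwargs).getD "primitive_type" "").toList 0 "array".toList
    else []
  String.ofList ("        final long[] shape = new long[".toList ++ PySem.Int.toChars ndims
    ++ "];\n".toList ++ body ++ "        return Dimension.of(shape);".toList)

-- ===== PRECONDITION & SPEC =====
-- Pre_ excludes exactly the inputs where Python A raises KeyError: ndims ≥ 2 with no
-- 'primitive_type' key in kwargs (Python B raises there too).
def Pre_get_dimensions_py (ndims : Int) (kwargs : List (String × String)) : Prop :=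
  2 ≤ ndims → (PySem.Dict.mk kwargs).contains "primitive_type" = true
instance (ndims : Int) (kwargs : List (String × String)) : Decidable (Pre_get_dimensions_py ndims kwargs) := by unfold Pre_get_dimensions_py; infer_instance

def pvWitness_get_dimensions_py : Int × (List (String × String)) := (3, [("primitive_type", "int")])

def Spec_get_dimensions_py (ndims : Int) (kwargs : List (String × String)) (out : String) : Prop := out = get_dimensions_py_alt ndims kwargs
instance (ndims : Int) (kwargs : List (String × String)) (out : String) : Decidable (Spec_get_dimensions_py ndims kwargs out) := by unfold Spec_get_dimensions_py; infer_instance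

-- ===== CLAIM (what is proved, stated in full; the proofs are below) =====
def Claim_equal_get_dimensions_py : Prop := ∀ (ndims : Int) (kwargs : List (String × String)), Dom_get_dimensions_py ndims kwargs → Pre_get_dimensions_py ndims kwargs → Spec_get_dimensions_py ndims kwargs (get_dimensions_py ndims kwargs)

-- ===== LEMMAS AND PROOFS =====

-- Named text pieces, used only to state the equation lemmas below.
def gdShapeLine (dim : Int) (prev : List Char) : List Char :=
  "        ".toList ++ PySem.List.pyRepeat "    ".toList dim ++ "shape[".toList
    ++ PySem.Int.toChars dim ++ "] = Math.max(shape[".toList ++ PySem.Int.toChars dim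
    ++ "], ".toList ++ prev ++ ".length);\n".toList

def gdForLine (ndims : Int) (pt : List Char) (dim : Int) (prev : List Char) : List Char :=
  "        ".toList ++ PySem.List.pyRepeat "    ".toList dim ++ "for (".toList ++ pt
    ++ PySem.List.pyRepeat "[]".toList (ndims - dim - 1) ++ " ".toList
    ++ "array".toList ++ PySem.Int.toChars (dim + 1) ++ " : ".toList ++ prev ++ ") {\n".toList

def gdCloser (dim : Int) : List Char :=
  "        ".toList ++ PySem.List.pyRepeat "    ".toList dim ++ "}\n".toList

def gdSub (dim : Int) : List Char := "array".toList ++ PySem.Int.toChars (dim + 1)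

theorem gdStep_pos (ndims : Int) (kwargs : List (String × String))
    (h t prev : List Char) (dim : Int) (hb : dim < ndims - 1) :
    gdStep ndims kwargs (h, t, prev) dim =
      (h ++ gdShapeLine dim prev
         ++ gdForLine ndims ((PySem.Dict.mk kwargs).getD "primitive_type" "").toList dim prev,
       gdCloser dim ++ t, gdSub dim) := by
  simp [gdStep, gdShapeLine, gdForLine, gdCloser, gdSub, hb, List.append_assoc]

theorem gdStep_neg (ndims : Int) (kwargs : List (String × String))
    (h t prev : List Char) (dim : Int) (hb : ¬ dim < ndims - 1) :
    gdStep ndims kwargs (h, t, prev) dim = (h ++ gdShapeLine dim prev, t, gdSub dim) := by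
  simp [gdStep, gdShapeLine, gdSub, hb, List.append_assoc]

theorem gdBlock_eq_pos (ndims : Int) (pt : List Char) (dim : Int) (prev : List Char)
    (hb : dim < ndims - 1) :
    gdBlock ndims pt dim prev =
      gdShapeLine dim prev ++ gdForLine ndims pt dim prev
        ++ gdBlock ndims pt (dim + 1) (gdSub dim) ++ gdCloser dim := by
  rw [gdBlock]
  simp [gdShapeLine, gdForLine, gdCloser, gdSub, hb, List.append_assoc]

theorem gdBlock_eq_neg (ndims : Int) (pt : List Char) (dim : Int) (prev : List Char)
    (hb : ¬ dim < ndims - 1) :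
    gdBlock ndims pt dim prev = gdShapeLine dim prev := by
  rw [gdBlock]
  simp [gdShapeLine, hb, List.append_assoc]

-- Loop invariant: running A's loop from `dim` (0 ≤ dim < ndims) on state (h, t, prev)
-- and concatenating its head and tail gives h ++ (B's recursive block) ++ t.
theorem gd_loop_eq (ndims : Int) (kwargs : List (String × String)) (dim : Int)
    (hd0 : 0 ≤ dim) (hdn : dim < ndims) :
    ∀ (h t prev : List Char),
      (((PySem.List.pyRange dim ndims 1).foldl (gdStep ndims kwargs) (h, t, prev)).1
        ++ ((PySem.List.pyRange dim ndims 1).foldl (gdStep ndims kwargs) (h, t, prev)).2.1)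
      = h ++ gdBlock ndims ((PySem.Dict.mk kwargs).getD "primitive_type" "").toList dim prev ++ t := by
  induction hk : (ndims - dim).toNat generalizing dim with
  | zero => omega
  | succ k ih =>
    intro h t prev
    rw [PySem.List.pyRange_one_cons hdn, List.foldl_cons]
    by_cases hb : dim < ndims - 1
    · rw [gdStep_pos ndims kwargs h t prev dim hb,
        ih (dim + 1) (by omega) (by omega) (by omega),
        gdBlock_eq_pos ndims _ dim prev hb]
      try simp [List.append_assoc]
    · have hend : ndims ≤ dim + 1 := by omega
      rw [gdStep_neg ndims kwargs h t prev dim hb,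
        PySem.List.pyRange_one_eq_nil hend, List.foldl_nil,
        gdBlock_eq_neg ndims _ dim prev hb]
      try simp [List.append_assoc]

theorem gd_eq (ndims : Int) (kwargs : List (String × String)) :
    get_dimensions_py ndims kwargs = get_dimensions_py_alt ndims kwargs := by
  unfold get_dimensions_py get_dimensions_py_alt
  dsimp only
  by_cases hpos : ndims > 0
  · rw [gd_loop_eq ndims kwargs 0 le_rfl hpos]
    simp [hpos, List.append_assoc]
  · have hnil : ndims ≤ 0 := by omega
    rw [PySem.List.pyRange_one_eq_nil hnil]
    simp [hpos]

-- ===== VERDICT (by name: the statement is the Claim_ definition above) =====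
theorem get_dimensions_py_spec : Claim_equal_get_dimensions_py := by
  intro ndims kwargs _ _
  unfold Spec_get_dimensions_py
  exact gd_eq ndims kwargs
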